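-- pv_equiv track=rewrite | github.com/panosprvo/Battleships | battleships.py | hit
-- ===== SOURCE A (Python) =====
-- def hit(row, column, fleet):
--     """
--     Assume that every hit results in a successful hit. Iterate through fleet to find the ship that has received the hit.
--     Add hit to ship's set of hits.
--     :param row: int; range (0, 9).
--     :param column: int; range (0, 9).
--     :param fleet: list of tuples.
--     :return: a tuple that contains the updated fleet and the ship that has received the hit.
--     """
--
--     hit_coord = (row, column)
--     hit_ship = None
--
--     for ship in fleet:
--         ship_coord = []
--         list_ship = list(ship)
--         if list_ship[2]:  # check direction of ship is horizontal
--             i = list_ship[1]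
--             for col in range(list_ship[3]):
--                 square = (list_ship[0], i)
--                 ship_coord.append(square)
--                 i += 1
--
--             if hit_coord in ship_coord:
--                 ship[4].add(hit_coord)
--                 hit_ship = ship
--             else:
--                 continue
--
--         elif not list_ship[2]:  # check direction of ship is vertical
--             i = list_ship[0]
--             for rows in range(list_ship[3]):
--                 square = (i, list_ship[1])
--                 ship_coord.append(square)
--                 i += 1
--
--             if hit_coord in ship_coord:
--                 ship[4].add(hit_coord)
--                 hit_ship = ship
--             else:
--                 continue
--
--     return fleet, hit_ship
-- ===== SOURCE B (Python) =====
-- def hit(row, column, fleet):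
--     """Arithmetic bounds check per ship instead of materialising each ship's coordinate list."""
--     def covers(ship):
--         r0, c0, horizontal, length, _hits = ship
--         if horizontal:
--             return row == r0 and c0 <= column < c0 + length
--         return column == c0 and r0 <= row < r0 + length
--
--     hit_ship = None
--     for ship in fleet:
--         if covers(ship):
--             ship[4].add((row, column))
--             hit_ship = ship
--     return fleet, hit_ship
-- ===== Notes on version B (the rewrite author's own statement) =====
-- stated objective: simpler
-- what changed: B replaces A's materialisation of each ship's full coordinate list (inner range loop) plus list membership test by a direct O(1) arithmetic bounds check per ship, keeping the scan over all ships (no early break) so last-match-wins and multi-ship updates are preserved.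
import Mathlib
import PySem

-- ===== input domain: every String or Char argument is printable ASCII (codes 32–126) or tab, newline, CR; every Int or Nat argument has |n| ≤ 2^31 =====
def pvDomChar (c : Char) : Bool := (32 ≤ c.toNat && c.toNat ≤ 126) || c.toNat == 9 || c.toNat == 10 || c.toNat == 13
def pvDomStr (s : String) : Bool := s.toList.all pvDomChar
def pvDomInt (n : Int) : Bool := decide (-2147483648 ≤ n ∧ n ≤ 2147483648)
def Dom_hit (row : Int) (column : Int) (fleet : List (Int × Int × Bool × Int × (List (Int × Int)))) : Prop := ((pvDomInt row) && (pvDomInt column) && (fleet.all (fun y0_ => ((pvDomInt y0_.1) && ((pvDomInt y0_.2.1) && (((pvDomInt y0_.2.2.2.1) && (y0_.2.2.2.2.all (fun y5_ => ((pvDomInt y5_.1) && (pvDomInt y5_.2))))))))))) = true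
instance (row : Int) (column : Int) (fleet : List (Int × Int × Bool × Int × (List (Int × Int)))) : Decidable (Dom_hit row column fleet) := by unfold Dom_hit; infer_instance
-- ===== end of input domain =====

-- B replaces A's per-ship coordinate-list construction + membership test by a direct arithmetic
-- bounds check per ship (objective: simpler). Equivalence is about the returned value; both
-- Pythons also mutate the ships' hit sets in place identically.


-- ===== PORT A =====
-- the inner `for col in range(...)` loop building ship_coord with the running index i
def hit (row : Int) (column : Int) (fleet : List (Int × Int × Bool × Int × (List (Int × Int)))) : (List (Int × Int × Bool × Int × (List (Int × Int)))) × (Option (Int × Int × Bool × Int × (List (Int × Int)))) :=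
  let hit_coord : Int × Int := (row, column)
  let res := fleet.foldl (fun (st : (List (Int × Int × Bool × Int × (List (Int × Int)))) × (Option (Int × Int × Bool × Int × (List (Int × Int))))) ship =>
    let ls := ship   -- list_ship = list(ship)
    if ls.2.2.1 then  -- horizontal
      let loop := (PySem.List.pyRange 0 ls.2.2.2.1 1).foldl
        (fun (p : List (Int × Int) × Int) _ => (p.1 ++ [(ls.1, p.2)], p.2 + 1)) ([], ls.2.1)
      let ship_coord := loop.1
      if hit_coord ∈ ship_coord then
        let ship' := (ls.1, ls.2.1, ls.2.2.1, ls.2.2.2.1, PySem.Set.add ls.2.2.2.2 hit_coord)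
        (st.1 ++ [ship'], some ship')
      else (st.1 ++ [ship], st.2)
    else  -- vertical
      let loop := (PySem.List.pyRange 0 ls.2.2.2.1 1).foldl
        (fun (p : List (Int × Int) × Int) _ => (p.1 ++ [(p.2, ls.2.1)], p.2 + 1)) ([], ls.1)
      let ship_coord := loop.1
      if hit_coord ∈ ship_coord then
        let ship' := (ls.1, ls.2.1, ls.2.2.1, ls.2.2.2.1, PySem.Set.add ls.2.2.2.2 hit_coord)
        (st.1 ++ [ship'], some ship')
      else (st.1 ++ [ship], st.2)) ([], none)
  res

-- ===== PORT B =====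
def hitCovers (row : Int) (column : Int) (ship : Int × Int × Bool × Int × (List (Int × Int))) : Bool :=
  if ship.2.2.1 then
    decide (row = ship.1 ∧ ship.2.1 ≤ column ∧ column < ship.2.1 + ship.2.2.2.1)
  else
    decide (column = ship.2.1 ∧ ship.1 ≤ row ∧ row < ship.1 + ship.2.2.2.1)

def hit_alt (row : Int) (column : Int) (fleet : List (Int × Int × Bool × Int × (List (Int × Int)))) : (List (Int × Int × Bool × Int × (List (Int × Int)))) × (Option (Int × Int × Bool × Int × (List (Int × Int)))) :=
  fleet.foldl (fun (st : (List (Int × Int × Bool × Int × (List (Int × Int)))) × (Option (Int × Int × Bool × Int × (List (Int × Int))))) ship =>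
    if hitCovers row column ship then
      let ship' := (ship.1, ship.2.1, ship.2.2.1, ship.2.2.2.1, PySem.Set.add ship.2.2.2.2 (row, column))
      (st.1 ++ [ship'], some ship')
    else (st.1 ++ [ship], st.2)) ([], none)

-- ===== PRECONDITION & SPEC =====
def Spec_hit (row : Int) (column : Int) (fleet : List (Int × Int × Bool × Int × (List (Int × Int)))) (out : (List (Int × Int × Bool × Int × (List (Int × Int)))) × (Option (Int × Int × Bool × Int × (List (Int × Int))))) : Prop := out = hit_alt row column fleet
instance (row : Int) (column : Int) (fleet : List (Int × Int × Bool × Int × (List (Int × Int)))) (out : (List (Int × Int × Bool × Int × (List (Int × Int)))) × (Option (Int × Int × Bool × Int × (List (Int × Int))))) : Decidable (Spec_hit row column fleet out) := by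
  unfold Spec_hit
  have h : DecidableEq (Int × Int × Bool × Int × (List (Int × Int))) := fun a b => inferInstance
  infer_instance

-- ===== CLAIM (what is proved, stated in full; the proofs are below) =====
def Claim_equal_hit : Prop := ∀ (row : Int) (column : Int) (fleet : List (Int × Int × Bool × Int × (List (Int × Int)))), Dom_hit row column fleet → Spec_hit row column fleet (hit row column fleet)

-- ===== LEMMAS AND PROOFS =====

-- membership in A's horizontally-built coordinate list, from any accumulator
theorem hit_mem_coordH (s0 : Int) (l : List Int) (acc : List (Int × Int)) (i r c : Int) :
    ((r, c) ∈ (l.foldl (fun (p : List (Int × Int) × Int) _ => (p.1 ++ [(s0, p.2)], p.2 + 1)) (acc, i)).1)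
      ↔ ((r, c) ∈ acc ∨ (r = s0 ∧ i ≤ c ∧ c < i + (l.length : Int))) := by
  induction l generalizing acc i with
  | nil => simp
  | cons a t ih =>
      simp only [List.foldl_cons]
      rw [ih]
      simp only [List.mem_append, List.mem_singleton, Prod.mk.injEq, List.length_cons]
      push_cast
      constructor
      · rintro ((h | ⟨rfl, rfl⟩) | ⟨rfl, h1, h2⟩)
        · exact Or.inl h
        · exact Or.inr ⟨rfl, by omega, by omega⟩
        · exact Or.inr ⟨rfl, by omega, by omega⟩
      · rintro (h | ⟨rfl, h1, h2⟩)
        · exact Or.inl (Or.inl h)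
        · by_cases hc : c = i
          · exact Or.inl (Or.inr ⟨rfl, hc⟩)
          · exact Or.inr ⟨rfl, by omega, by omega⟩

-- membership in A's vertically-built coordinate list, from any accumulator
theorem hit_mem_coordV (s1 : Int) (l : List Int) (acc : List (Int × Int)) (i r c : Int) :
    ((r, c) ∈ (l.foldl (fun (p : List (Int × Int) × Int) _ => (p.1 ++ [(p.2, s1)], p.2 + 1)) (acc, i)).1)
      ↔ ((r, c) ∈ acc ∨ (c = s1 ∧ i ≤ r ∧ r < i + (l.length : Int))) := by
  induction l generalizing acc i with
  | nil => simp
  | cons a t ih =>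
      simp only [List.foldl_cons]
      rw [ih]
      simp only [List.mem_append, List.mem_singleton, Prod.mk.injEq, List.length_cons]
      push_cast
      constructor
      · rintro ((h | ⟨rfl, rfl⟩) | ⟨rfl, h1, h2⟩)
        · exact Or.inl h
        · exact Or.inr ⟨rfl, by omega, by omega⟩
        · exact Or.inr ⟨rfl, by omega, by omega⟩
      · rintro (h | ⟨rfl, h1, h2⟩)
        · exact Or.inl (Or.inl h)
        · by_cases hr : r = i
          · exact Or.inl (Or.inr ⟨hr, rfl⟩)
          · exact Or.inr ⟨rfl, by omega, by omega⟩

theorem hit_len_pyRange (n : Int) : ((PySem.List.pyRange 0 n 1).length : Int) = n.toNat := by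
  have := PySem.List.length_pyRange_one 0 n
  omega

-- per-ship, horizontal: A's membership test decides exactly B's arithmetic check
theorem hit_mem_iff_covers_h (row column : Int) (ship : Int × Int × Bool × Int × (List (Int × Int)))
    (hdir : ship.2.2.1 = true) :
    ((row, column) ∈ (((PySem.List.pyRange 0 ship.2.2.2.1 1).foldl
        (fun (p : List (Int × Int) × Int) _ => (p.1 ++ [(ship.1, p.2)], p.2 + 1)) ([], ship.2.1)).1)
      ↔ hitCovers row column ship = true) := by
  obtain ⟨s0, s1, dir, n, hits⟩ := ship
  cases dir
  · simp at hdir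
  · rw [hit_mem_coordH]
    have hlen := hit_len_pyRange n
    simp only [List.not_mem_nil, false_or]
    simp [hitCovers]
    omega

-- per-ship, vertical
theorem hit_mem_iff_covers_v (row column : Int) (ship : Int × Int × Bool × Int × (List (Int × Int)))
    (hdir : ship.2.2.1 = false) :
    ((row, column) ∈ (((PySem.List.pyRange 0 ship.2.2.2.1 1).foldl
        (fun (p : List (Int × Int) × Int) _ => (p.1 ++ [(p.2, ship.2.1)], p.2 + 1)) ([], ship.1)).1)
      ↔ hitCovers row column ship = true) := by
  obtain ⟨s0, s1, dir, n, hits⟩ := ship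
  cases dir
  · rw [hit_mem_coordV]
    have hlen := hit_len_pyRange n
    simp only [List.not_mem_nil, false_or]
    simp [hitCovers]
    omega
  · simp at hdir

-- the two folds agree from any common accumulator
theorem hit_foldl_eq (row column : Int) (fleet : List (Int × Int × Bool × Int × (List (Int × Int))))
    (st : (List (Int × Int × Bool × Int × (List (Int × Int)))) × (Option (Int × Int × Bool × Int × (List (Int × Int))))) :
    fleet.foldl (fun st ship =>
      if ship.2.2.1 then
        if (row, column) ∈ (((PySem.List.pyRange 0 ship.2.2.2.1 1).foldl
            (fun (p : List (Int × Int) × Int) _ => (p.1 ++ [(ship.1, p.2)], p.2 + 1)) ([], ship.2.1)).1) then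
          (st.1 ++ [(ship.1, ship.2.1, ship.2.2.1, ship.2.2.2.1, PySem.Set.add ship.2.2.2.2 (row, column))],
           some (ship.1, ship.2.1, ship.2.2.1, ship.2.2.2.1, PySem.Set.add ship.2.2.2.2 (row, column)))
        else (st.1 ++ [ship], st.2)
      else
        if (row, column) ∈ (((PySem.List.pyRange 0 ship.2.2.2.1 1).foldl
            (fun (p : List (Int × Int) × Int) _ => (p.1 ++ [(p.2, ship.2.1)], p.2 + 1)) ([], ship.1)).1) then
          (st.1 ++ [(ship.1, ship.2.1, ship.2.2.1, ship.2.2.2.1, PySem.Set.add ship.2.2.2.2 (row, column))],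
           some (ship.1, ship.2.1, ship.2.2.1, ship.2.2.2.1, PySem.Set.add ship.2.2.2.2 (row, column)))
        else (st.1 ++ [ship], st.2)) st
    = fleet.foldl (fun st ship =>
        if hitCovers row column ship then
          (st.1 ++ [(ship.1, ship.2.1, ship.2.2.1, ship.2.2.2.1, PySem.Set.add ship.2.2.2.2 (row, column))],
           some (ship.1, ship.2.1, ship.2.2.1, ship.2.2.2.1, PySem.Set.add ship.2.2.2.2 (row, column)))
        else (st.1 ++ [ship], st.2)) st := by
  induction fleet generalizing st with
  | nil => rfl
  | cons ship t ih =>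
      simp only [List.foldl_cons]
      by_cases hdir : ship.2.2.1 = true
      · have hmem := hit_mem_iff_covers_h row column ship hdir
        rw [if_pos hdir]
        by_cases hc : hitCovers row column ship = true
        · rw [if_pos (hmem.mpr hc), if_pos hc]; exact ih _
        · rw [if_neg (fun h => hc (hmem.mp h)), if_neg hc]; exact ih _
      · have hmem := hit_mem_iff_covers_v row column ship (by simpa using hdir)
        rw [if_neg hdir]
        by_cases hc : hitCovers row column ship = true
        · rw [if_pos (hmem.mpr hc), if_pos hc]; exact ih _
        · rw [if_neg (fun h => hc (hmem.mp h)), if_neg hc]; exact ih _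

-- ===== VERDICT (by name: the statement is the Claim_ definition above) =====
theorem hit_spec : Claim_equal_hit := by
  intro row column fleet _
  show hit row column fleet = hit_alt row column fleet
  unfold hit hit_alt
  exact hit_foldl_eq row column fleet ([], none)
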